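-- pv_equiv track=rewrite | github.com/wuzikang961215/Personal-Projects | Gomoku-AI/scripts/updateData.py | calculateDir
-- ===== SOURCE A (Python) =====
-- def calculateDir(row, column, direction, depth, enemy, board):
--     # This function should return the string pattern based on the board and direction
--     # This setting assumes that the AI is the black stone
--     s = '2' if enemy else '1'  # Set in the middle if it's AI's turn (black stone by default)
--
--     i = 1
--
--     while depth > 0:
--         if direction == 'north':
--             if row - i >= 0:
--                 s = str(board[row - i][column]) + s
--             if row + i < len(board):
--                 s += str(board[row + i][column])
--
--         elif direction == 'west':
--             if column - i >= 0:
--                 s = str(board[row][column - i]) + s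
--             if column + i < len(board[0]):
--                 s += str(board[row][column + i])
--
--         elif direction == 'northwest':
--             if row - i >= 0 and column - i >= 0:
--                 s = str(board[row - i][column - i]) + s
--             if column + i < len(board[0]) and row + i < len(board):
--                 s += str(board[row + i][column + i])
--
--         elif direction == 'northeast':
--             if row - i >= 0 and column + i < len(board[0]):
--                 s = str(board[row - i][column + i]) + s
--             if row + i < len(board) and column - i >= 0:
--                 s += str(board[row + i][column - i])
--
--         i += 1
--         depth -= 1
--
--     return s
-- ===== SOURCE B (Python) =====
-- def calculateDir(row, column, direction, depth, enemy, board):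
--     # Clipping instead of scanning: compute in closed form how many cells fit on
--     # each side (depth clipped against the distance to each border), then read
--     # exactly those cells unconditionally -- no per-cell bounds test, and only
--     # min(depth, board extent) reads instead of depth loop iterations.
--     mid = '2' if enemy else '1'
--     if depth <= 0:
--         return mid
--     H = len(board)
--     if direction == 'north':
--         dr, dc = -1, 0
--         nb = min(depth, row)
--         nf = min(depth, H - row - 1)
--     elif direction == 'west':
--         W = len(board[0])
--         dr, dc = 0, -1
--         nb = min(depth, column)
--         nf = min(depth, W - column - 1)
--     elif direction == 'northwest':
--         W = len(board[0])
--         dr, dc = -1, -1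
--         nb = min(depth, row, column)
--         nf = min(depth, H - row - 1, W - column - 1)
--     elif direction == 'northeast':
--         W = len(board[0])
--         dr, dc = -1, 1
--         nb = min(depth, row, W - column - 1)
--         nf = min(depth, H - row - 1, column)
--     else:
--         return mid
--     back = [str(board[row + dr * i][column + dc * i]) for i in range(1, max(nb, 0) + 1)]
--     fwd = [str(board[row - dr * i][column - dc * i]) for i in range(1, max(nf, 0) + 1)]
--     return ''.join(reversed(back)) + mid + ''.join(fwd)
-- ===== Notes on version B (the rewrite author's own statement) =====
-- stated objective: faster
-- what changed: A scans every offset i=1..depth testing each against the borders; B computes in closed form how many cells fit on each side (depth clipped by the distance to each border) and reads exactly those cells unconditionally, so the loops carry no bounds test and run only min(depth, board extent) times instead of depth.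
-- outside the precondition, e.g. on calculateDir(0, 0, 'north', 1, False, [[1], [2, 3]]): A returns '12', B returns '12'; on calculateDir(3, 0, 'north', 1, False, [[1], [2], [3]]): A returns '31', B returns '31'
import Mathlib
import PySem

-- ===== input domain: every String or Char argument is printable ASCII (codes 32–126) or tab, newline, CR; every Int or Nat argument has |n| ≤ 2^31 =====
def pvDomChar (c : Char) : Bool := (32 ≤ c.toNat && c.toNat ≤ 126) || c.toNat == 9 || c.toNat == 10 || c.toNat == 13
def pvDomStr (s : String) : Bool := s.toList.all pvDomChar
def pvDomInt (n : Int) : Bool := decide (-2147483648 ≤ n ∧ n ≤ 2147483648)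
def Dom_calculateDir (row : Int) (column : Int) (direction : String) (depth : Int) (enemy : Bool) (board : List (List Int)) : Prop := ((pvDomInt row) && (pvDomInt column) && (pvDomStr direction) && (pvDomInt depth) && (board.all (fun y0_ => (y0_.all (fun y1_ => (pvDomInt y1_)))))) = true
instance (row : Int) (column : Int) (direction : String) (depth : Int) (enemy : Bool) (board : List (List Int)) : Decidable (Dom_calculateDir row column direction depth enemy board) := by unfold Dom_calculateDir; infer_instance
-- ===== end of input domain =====

-- B replaces A's scan (test every offset i = 1..depth against the borders) by
-- closed-form clipping: it computes how many cells fit on each side and reads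
-- exactly those cells, with no bounds test in any loop.

-- ===== PORT A =====
-- str(board[r][c]); the getD defaults stand for IndexError (those reads are excluded by Pre_)
def pvACell (board : List (List Int)) (r c : Int) : String :=
  PySem.Int.toStr (PySem.List.pyGetD (PySem.List.pyGetD board r []) c 0)

-- len(board[0]); the default stands for the IndexError on an empty board (excluded by Pre_)
def pvARowLen (board : List (List Int)) : Int :=
  ((PySem.List.pyGetD board 0 []).length : Int)

-- the 'while depth > 0' loop of A: fuel = remaining iterations, i, s as in the Python
def pvALoop (row column : Int) (direction : String) (board : List (List Int)) :
    Nat → Int → String → String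
  | 0, _, s => s
  | n + 1, i, s =>
    let s :=
      if direction == "north" then
        let s := if 0 ≤ row - i then pvACell board (row - i) column ++ s else s
        if row + i < (board.length : Int) then s ++ pvACell board (row + i) column else s
      else if direction == "west" then
        let s := if 0 ≤ column - i then pvACell board row (column - i) ++ s else s
        if column + i < pvARowLen board then s ++ pvACell board row (column + i) else s
      else if direction == "northwest" then
        let s := if 0 ≤ row - i ∧ 0 ≤ column - i then pvACell board (row - i) (column - i) ++ s else s
        if column + i < pvARowLen board ∧ row + i < (board.length : Int) then
          s ++ pvACell board (row + i) (column + i) else s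
      else if direction == "northeast" then
        let s := if 0 ≤ row - i ∧ column + i < pvARowLen board then pvACell board (row - i) (column + i) ++ s else s
        if row + i < (board.length : Int) ∧ 0 ≤ column - i then
          s ++ pvACell board (row + i) (column - i) else s
      else s
    pvALoop row column direction board n (i + 1) s

def calculateDir (row : Int) (column : Int) (direction : String) (depth : Int) (enemy : Bool) (board : List (List Int)) : String :=
  pvALoop row column direction board depth.toNat 1 (if enemy then "2" else "1")

-- ===== PORT B =====
-- str(board[r][c]) for B; same IndexError-totalisation as A's cell read (outside Pre_)
def pvBCell (board : List (List Int)) (r c : Int) : String :=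
  PySem.Int.toStr (PySem.List.pyGetD (PySem.List.pyGetD board r []) c 0)

-- '[str(board[row+dr*i][column+dc*i]) for i in range(1, max(n,0)+1)]' — no bounds test
def pvBRay (row column : Int) (board : List (List Int)) (dr dc n : Int) : List String :=
  (PySem.List.pyRange 1 (max n 0 + 1) 1).map
    (fun i => pvBCell board (row + dr * i) (column + dc * i))

-- the shared tail of B: ''.join(reversed(back)) + mid + ''.join(fwd)
def pvBFinish (row column : Int) (board : List (List Int)) (dr dc nb nf : Int) (mid : String) : String :=
  PySem.Str.join "" (pvBRay row column board dr dc nb).reverse ++ mid ++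
    PySem.Str.join "" (pvBRay row column board (-dr) (-dc) nf)

def calculateDir_alt (row : Int) (column : Int) (direction : String) (depth : Int) (enemy : Bool) (board : List (List Int)) : String :=
  let mid := if enemy then "2" else "1"
  if depth ≤ 0 then mid
  else
    let H : Int := (board.length : Int)
    if direction == "north" then
      pvBFinish row column board (-1) 0 (min depth row) (min depth (H - row - 1)) mid
    else if direction == "west" then
      let W : Int := ((PySem.List.pyGetD board 0 []).length : Int)
      pvBFinish row column board 0 (-1) (min depth column) (min depth (W - column - 1)) mid
    else if direction == "northwest" then
      let W : Int := ((PySem.List.pyGetD board 0 []).length : Int)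
      pvBFinish row column board (-1) (-1) (min depth (min row column))
        (min depth (min (H - row - 1) (W - column - 1))) mid
    else if direction == "northeast" then
      let W : Int := ((PySem.List.pyGetD board 0 []).length : Int)
      pvBFinish row column board (-1) 1 (min depth (min row (W - column - 1)))
        (min depth (min (H - row - 1) column)) mid
    else mid

-- ===== PRECONDITION & SPEC =====
-- Pre_ excludes inputs on which A may raise IndexError: a recognised direction with
-- positive depth over an empty, ragged or out-of-python-range (row, column) board.
-- On some such inputs A happens to return (a lucky ragged board, a wrapped negative
-- index never reached) — excluded all the same, since safety there is an accident of
-- which guards fire; negative in-python-range row/column (wraparound reads) stay inside.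
def Pre_calculateDir (row : Int) (column : Int) (direction : String) (depth : Int) (enemy : Bool) (board : List (List Int)) : Prop :=
  depth ≤ 0 ∨
  (direction ≠ "north" ∧ direction ≠ "west" ∧ direction ≠ "northwest" ∧ direction ≠ "northeast") ∨
  (board ≠ [] ∧ (∀ r ∈ board, r.length = (board.headD []).length) ∧
   -(board.length : Int) ≤ row ∧ row < (board.length : Int) ∧
   -((board.headD []).length : Int) ≤ column ∧ column < ((board.headD []).length : Int))

instance (row : Int) (column : Int) (direction : String) (depth : Int) (enemy : Bool) (board : List (List Int)) : Decidable (Pre_calculateDir row column direction depth enemy board) := by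
  unfold Pre_calculateDir; infer_instance

def pvWitness_calculateDir : Int × Int × String × Int × Bool × List (List Int) :=
  (1, 0, "north", 2, false, [[0, 1], [2, 0], [1, 1]])

def Spec_calculateDir (row : Int) (column : Int) (direction : String) (depth : Int) (enemy : Bool) (board : List (List Int)) (out : String) : Prop := out = calculateDir_alt row column direction depth enemy board
instance (row : Int) (column : Int) (direction : String) (depth : Int) (enemy : Bool) (board : List (List Int)) (out : String) : Decidable (Spec_calculateDir row column direction depth enemy board out) := by unfold Spec_calculateDir; infer_instance

-- ===== CLAIM (what is proved, stated in full; the proofs are below) =====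
-- The ports agree on ALL inputs (both totalise the out-of-range reads the same way),
-- so the proof holds on Pre_ a fortiori; Pre_ marks where the ports are faithful to the Pythons.
def Claim_equal_calculateDir : Prop := ∀ (row : Int) (column : Int) (direction : String) (depth : Int) (enemy : Bool) (board : List (List Int)), Dom_calculateDir row column direction depth enemy board → Pre_calculateDir row column direction depth enemy board → Spec_calculateDir row column direction depth enemy board (calculateDir row column direction depth enemy board)

-- ===== LEMMAS AND PROOFS =====

-- "".join lemmas
theorem pvJoin_nil : PySem.Str.join "" ([] : List String) = "" := by
  simp [PySem.Str.join, PySem.Chars.join, List.intercalate]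

theorem pvJoin_cons (x : String) (l : List String) :
    PySem.Str.join "" (x :: l) = x ++ PySem.Str.join "" l := by
  apply String.toList_inj.mp
  simp [PySem.Str.join, PySem.Chars.join, List.intercalate]
  induction l with
  | nil => simp
  | cons a t ih => cases t <;> simp_all [List.intersperse]

theorem pvJoin_append (l₁ l₂ : List String) :
    PySem.Str.join "" (l₁ ++ l₂) = PySem.Str.join "" l₁ ++ PySem.Str.join "" l₂ := by
  induction l₁ with
  | nil => simp [pvJoin_nil]
  | cons a t ih => simp [pvJoin_cons, ih, String.append_assoc]

-- generic shape of one A-iteration: prepend on guard g₁, append on guard g₂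
def pvGLoop (g₁ g₂ : Int → Bool) (c₁ c₂ : Int → String) : Nat → Int → String → String
  | 0, _, s => s
  | n + 1, i, s =>
    let s := if g₁ i then c₁ i ++ s else s
    let s := if g₂ i then s ++ c₂ i else s
    pvGLoop g₁ g₂ c₁ c₂ n (i + 1) s

theorem pvGLoop_char (g₁ g₂ : Int → Bool) (c₁ c₂ : Int → String) :
    ∀ (n : Nat) (i : Int) (s : String),
      pvGLoop g₁ g₂ c₁ c₂ n i s =
        PySem.Str.join "" ((((PySem.List.pyRange i (i + n) 1).filter g₁).map c₁).reverse)
          ++ s ++ PySem.Str.join "" (((PySem.List.pyRange i (i + n) 1).filter g₂).map c₂) := by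
  intro n
  induction n with
  | zero =>
    intro i s
    simp [pvGLoop, PySem.List.pyRange_one_eq_nil (le_refl i), pvJoin_nil]
  | succ n ih =>
    intro i s
    have hsplit : PySem.List.pyRange i (i + (n + 1 : Nat)) 1 = i :: PySem.List.pyRange (i + 1) (i + 1 + n) 1 := by
      rw [PySem.List.pyRange_one_cons (by omega)]
      congr 1
      push_cast; ring_nf
    rw [pvGLoop, ih, hsplit]
    simp only [List.filter_cons]
    by_cases h1 : g₁ i <;> by_cases h2 : g₂ i <;>
      simp [h1, h2, pvJoin_append, pvJoin_cons, pvJoin_nil, String.append_assoc]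

-- A's loop per direction is pvGLoop at A's own guards and cell reads
theorem pvA_north (row column : Int) (board : List (List Int)) :
    ∀ (n : Nat) (i : Int) (s : String),
      pvALoop row column "north" board n i s =
        pvGLoop (fun j => decide (0 ≤ row - j)) (fun j => decide (row + j < (board.length : Int)))
                (fun j => pvACell board (row - j) column) (fun j => pvACell board (row + j) column) n i s := by
  intro n
  induction n with
  | zero => intro i s; rfl
  | succ n ih => intro i s; rw [pvALoop, pvGLoop, ih]; simp

theorem pvA_west (row column : Int) (board : List (List Int)) :
    ∀ (n : Nat) (i : Int) (s : String),
      pvALoop row column "west" board n i s =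
        pvGLoop (fun j => decide (0 ≤ column - j)) (fun j => decide (column + j < pvARowLen board))
                (fun j => pvACell board row (column - j)) (fun j => pvACell board row (column + j)) n i s := by
  intro n
  induction n with
  | zero => intro i s; rfl
  | succ n ih => intro i s; rw [pvALoop, pvGLoop, ih]; simp

theorem pvA_northwest (row column : Int) (board : List (List Int)) :
    ∀ (n : Nat) (i : Int) (s : String),
      pvALoop row column "northwest" board n i s =
        pvGLoop (fun j => decide (0 ≤ row - j ∧ 0 ≤ column - j))
                (fun j => decide (column + j < pvARowLen board ∧ row + j < (board.length : Int)))
                (fun j => pvACell board (row - j) (column - j))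
                (fun j => pvACell board (row + j) (column + j)) n i s := by
  intro n
  induction n with
  | zero => intro i s; rfl
  | succ n ih => intro i s; rw [pvALoop, pvGLoop, ih]; simp

theorem pvA_northeast (row column : Int) (board : List (List Int)) :
    ∀ (n : Nat) (i : Int) (s : String),
      pvALoop row column "northeast" board n i s =
        pvGLoop (fun j => decide (0 ≤ row - j ∧ column + j < pvARowLen board))
                (fun j => decide (row + j < (board.length : Int) ∧ 0 ≤ column - j))
                (fun j => pvACell board (row - j) (column + j))
                (fun j => pvACell board (row + j) (column - j)) n i s := by
  intro n
  induction n with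
  | zero => intro i s; rfl
  | succ n ih => intro i s; rw [pvALoop, pvGLoop, ih]; simp

-- unrecognised direction: A's loop is the identity on s
theorem pvA_other (row column : Int) (direction : String) (board : List (List Int))
    (h1 : direction ≠ "north") (h2 : direction ≠ "west")
    (h3 : direction ≠ "northwest") (h4 : direction ≠ "northeast") :
    ∀ (n : Nat) (i : Int) (s : String),
      pvALoop row column direction board n i s = s := by
  intro n
  induction n with
  | zero => intro i s; rfl
  | succ n ih =>
    intro i s
    rw [pvALoop]
    simp [h1, h2, h3, h4, ih]

-- filtering a unit-step range by a threshold i ≤ c clips the range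
theorem pvFilter_thresh (c : Int) :
    ∀ (n : Nat) (a : Int),
      (PySem.List.pyRange a (a + n) 1).filter (fun i => decide (i ≤ c)) =
        PySem.List.pyRange a (min (a + n) (c + 1)) 1 := by
  intro n
  induction n with
  | zero =>
    intro a
    rw [PySem.List.pyRange_one_eq_nil (by omega), PySem.List.pyRange_one_eq_nil (by omega)]
    rfl
  | succ n ih =>
    intro a
    rw [PySem.List.pyRange_one_cons (show a < a + ((n : Nat) + 1 : Nat) by push_cast; omega)]
    rw [List.filter_cons]
    by_cases h : a ≤ c
    · rw [if_pos (by simpa using h)]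
      rw [show a + ((n : Nat) + 1 : Nat) = (a + 1) + (n : Nat) by push_cast; ring, ih]
      rw [PySem.List.pyRange_one_cons (show a < min ((a + 1) + (n : Nat)) (c + 1) by omega)]
    · rw [if_neg (by simpa using h)]
      rw [show a + ((n : Nat) + 1 : Nat) = (a + 1) + (n : Nat) by push_cast; ring, ih]
      rw [PySem.List.pyRange_one_eq_nil (by omega), PySem.List.pyRange_one_eq_nil (by omega)]

-- the clipped A-range is B's range (for positive depth)
theorem pvRange_clip (depth bnd : Int) (hd : 0 < depth) :
    PySem.List.pyRange 1 (min (1 + ((depth.toNat : Nat) : Int)) (bnd + 1)) 1 =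
      PySem.List.pyRange 1 (max (min depth bnd) 0 + 1) 1 := by
  by_cases hb : 0 ≤ bnd
  · congr 1; omega
  · rw [PySem.List.pyRange_one_eq_nil (by omega), PySem.List.pyRange_one_eq_nil (by omega)]

-- filter-then-map of A's scan = map over B's clipped range
theorem pvFM (depth bnd : Int) (hd : 0 < depth) (g : Int → Bool)
    (hg : ∀ j, g j = decide (j ≤ bnd)) (f : Int → String) :
    ((PySem.List.pyRange 1 (1 + ((depth.toNat : Nat) : Int)) 1).filter g).map f =
      (PySem.List.pyRange 1 (max (min depth bnd) 0 + 1) 1).map f := by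
  congr 1
  rw [funext hg, pvFilter_thresh bnd depth.toNat 1, pvRange_clip depth bnd hd]

-- B's ray written with A's cell reader (the two cell readers coincide)
theorem pvBRay_eq (row column : Int) (board : List (List Int)) (dr dc n : Int) :
    pvBRay row column board dr dc n =
      (PySem.List.pyRange 1 (max n 0 + 1) 1).map
        (fun i => pvACell board (row + dr * i) (column + dc * i)) := rfl

-- ===== VERDICT (by name: the statement is the Claim_ definition above) =====
theorem calculateDir_spec : Claim_equal_calculateDir := by
  intro row column direction depth enemy board _hdom _hpre
  unfold Spec_calculateDir
  by_cases hd : depth ≤ 0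
  · have h0 : depth.toNat = 0 := by omega
    simp [calculateDir, calculateDir_alt, h0, hd, pvALoop]
  · have hdpos : 0 < depth := by omega
    have hn : ((depth.toNat : Nat) : Int) + 1 = 1 + ((depth.toNat : Nat) : Int) := by ring
    by_cases h1 : direction = "north"
    · subst h1
      rw [calculateDir, pvA_north, pvGLoop_char]
      have hB : calculateDir_alt row column "north" depth enemy board =
          pvBFinish row column board (-1) 0 (min depth row)
            (min depth ((board.length : Int) - row - 1)) (if enemy then "2" else "1") := by
        simp [calculateDir_alt, hd]
      rw [hB, pvBFinish, pvBRay_eq, pvBRay_eq]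
      simp only [neg_neg, neg_zero, one_mul, zero_mul, add_zero, neg_one_mul, ← sub_eq_add_neg]
      rw [pvFM depth row hdpos _ (fun j => by simp only [decide_eq_decide]; omega)]
      rw [pvFM depth ((board.length : Int) - row - 1) hdpos _ (fun j => by simp only [decide_eq_decide]; omega)]
    · by_cases h2 : direction = "west"
      · subst h2
        rw [calculateDir, pvA_west, pvGLoop_char]
        have hB : calculateDir_alt row column "west" depth enemy board =
            pvBFinish row column board 0 (-1) (min depth column)
              (min depth (pvARowLen board - column - 1)) (if enemy then "2" else "1") := by
          simp [calculateDir_alt, hd, pvARowLen]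
        rw [hB, pvBFinish, pvBRay_eq, pvBRay_eq]
        simp only [neg_neg, neg_zero, one_mul, zero_mul, add_zero, neg_one_mul, ← sub_eq_add_neg]
        rw [pvFM depth column hdpos _ (fun j => by simp only [decide_eq_decide]; omega)]
        rw [pvFM depth (pvARowLen board - column - 1) hdpos _ (fun j => by simp only [decide_eq_decide]; omega)]
      · by_cases h3 : direction = "northwest"
        · subst h3
          rw [calculateDir, pvA_northwest, pvGLoop_char]
          have hB : calculateDir_alt row column "northwest" depth enemy board =
              pvBFinish row column board (-1) (-1) (min depth (min row column))
                (min depth (min ((board.length : Int) - row - 1) (pvARowLen board - column - 1)))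
                (if enemy then "2" else "1") := by
            simp [calculateDir_alt, hd, pvARowLen]
          rw [hB, pvBFinish, pvBRay_eq, pvBRay_eq]
          simp only [neg_neg, one_mul, neg_one_mul, ← sub_eq_add_neg]
          rw [pvFM depth (min row column) hdpos _ (fun j => by simp only [decide_eq_decide]; omega)]
          rw [pvFM depth (min ((board.length : Int) - row - 1) (pvARowLen board - column - 1)) hdpos _
            (fun j => by simp only [decide_eq_decide]; omega)]
        · by_cases h4 : direction = "northeast"
          · subst h4
            rw [calculateDir, pvA_northeast, pvGLoop_char]
            have hB : calculateDir_alt row column "northeast" depth enemy board =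
                pvBFinish row column board (-1) 1 (min depth (min row (pvARowLen board - column - 1)))
                  (min depth (min ((board.length : Int) - row - 1) column))
                  (if enemy then "2" else "1") := by
              simp [calculateDir_alt, hd, pvARowLen]
            rw [hB, pvBFinish, pvBRay_eq, pvBRay_eq]
            simp only [neg_neg, one_mul, neg_one_mul, ← sub_eq_add_neg]
            rw [pvFM depth (min row (pvARowLen board - column - 1)) hdpos _
              (fun j => by simp only [decide_eq_decide]; omega)]
            rw [pvFM depth (min ((board.length : Int) - row - 1) column) hdpos _
              (fun j => by simp only [decide_eq_decide]; omega)]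
          · rw [calculateDir, pvA_other row column direction board h1 h2 h3 h4]
            simp [calculateDir_alt, hd, beq_iff_eq, h1, h2, h3, h4]
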